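-- pv_equiv track=rewrite | github.com/daronzwink/AdventOfCode2025 | day02/day02.py | is_invalid_id_part2
-- ===== SOURCE A (Python) =====
-- def is_invalid_id_part2(num):
--     """
--     Check if a number is an invalid ID (pattern repeated at least twice).
--
--     Args:
--         num: Integer to check
--
--     Returns:
--         True if the number is made of a pattern repeated at least twice
--     """
--     s = str(num)
--     n = len(s)
--
--     # Try all possible pattern lengths from 1 to n/2
--     for pattern_len in range(1, n // 2 + 1):
--         # Check if n is divisible by pattern_len (so pattern repeats evenly)
--         if n % pattern_len == 0:
--             pattern = s[:pattern_len]
--             repetitions = n // pattern_len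
--             # repetitions will automatically be >= 2 since pattern_len <= n/2
--             if pattern * repetitions == s:
--                 return True
--     return False
-- ===== SOURCE B (Python) =====
-- def is_invalid_id_part2(num):
--     """
--     Check if a number is an invalid ID (pattern repeated at least twice).
--
--     Standard string-periodicity trick: s is some block repeated at least
--     twice exactly when s occurs inside its own doubling with the first and
--     last characters removed.
--     """
--     s = str(num)
--     return s in (s + s)[1:-1]
-- ===== Notes on version B (the rewrite author's own statement) =====
-- stated objective: idiomatic
-- what changed: Replaces the divisor loop with per-length block comparisons by the classic periodicity criterion: one membership test of s inside (s+s)[1:-1].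
import Mathlib
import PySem

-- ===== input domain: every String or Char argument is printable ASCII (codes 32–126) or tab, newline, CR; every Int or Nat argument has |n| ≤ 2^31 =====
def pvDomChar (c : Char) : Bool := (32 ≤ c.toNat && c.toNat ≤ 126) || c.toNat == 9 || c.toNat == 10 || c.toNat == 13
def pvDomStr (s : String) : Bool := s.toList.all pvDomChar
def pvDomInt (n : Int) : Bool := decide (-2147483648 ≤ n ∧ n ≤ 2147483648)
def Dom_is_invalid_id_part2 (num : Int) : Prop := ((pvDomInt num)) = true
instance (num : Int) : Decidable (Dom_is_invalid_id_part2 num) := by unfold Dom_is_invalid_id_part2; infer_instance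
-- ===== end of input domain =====

-- B replaces A's divisor loop by the standard periodicity criterion: one membership test of s in (s+s)[1:-1] (objective: idiomatic).

-- ===== PORT A =====
def is_invalid_id_part2 (num : Int) : Bool :=
  let s := PySem.Int.toChars num
  let n : Int := PySem.List.len s
  -- for pattern_len in range(1, n // 2 + 1): … return True / return False  ⇒  .any
  (PySem.List.pyRange 1 (PySem.Int.floordiv n 2 + 1) 1).any (fun pattern_len =>
    if PySem.Int.mod n pattern_len == 0 then
      let pattern := PySem.List.slice s none (some pattern_len)
      let repetitions := PySem.Int.floordiv n pattern_len
      PySem.List.pyRepeat pattern repetitions == s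
    else false)

-- ===== PORT B =====
def is_invalid_id_part2_alt (num : Int) : Bool :=
  let s := PySem.Int.toChars num
  PySem.Chars.isIn s (PySem.List.slice (s ++ s) (some 1) (some (-1)))

-- ===== PRECONDITION & SPEC =====
def Spec_is_invalid_id_part2 (num : Int) (out : Bool) : Prop := out = is_invalid_id_part2_alt num
instance (num : Int) (out : Bool) : Decidable (Spec_is_invalid_id_part2 num out) := by unfold Spec_is_invalid_id_part2; infer_instance

-- ===== CLAIM (what is proved, stated in full; the proofs are below) =====
def Claim_equal_is_invalid_id_part2 : Prop := ∀ (num : Int), Dom_is_invalid_id_part2 num → Spec_is_invalid_id_part2 num (is_invalid_id_part2 num)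

-- ===== LEMMAS AND PROOFS =====

-- str(num) is never the empty string
theorem pv_toDigitsCore_ne_nil (b : ℕ) : ∀ (fuel n : ℕ) (ds : List Char), ds ≠ [] → Nat.toDigitsCore b fuel n ds ≠ [] := by
  intro fuel
  induction fuel with
  | zero => intro n ds h; simpa [Nat.toDigitsCore] using h
  | succ f ih =>
    intro n ds h
    rw [Nat.toDigitsCore]
    split
    · exact List.cons_ne_nil _ _
    · exact ih _ _ (List.cons_ne_nil _ _)

theorem pv_toChars_ne_nil (n : Int) : PySem.Int.toChars n ≠ [] := by
  unfold PySem.Int.toChars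
  split
  · exact List.cons_ne_nil _ _
  · rw [Nat.toDigits, Nat.toDigitsCore]
    split
    · exact List.cons_ne_nil _ _
    · exact pv_toDigitsCore_ne_nil _ _ _ _ (List.cons_ne_nil _ _)

-- a power of its |p|-prefix is fixed by rotation by |p|
theorem pv_power_rotate {α : Type} (p : List α) (k : ℕ) (hk : 1 ≤ k) :
    ((List.replicate k p).flatten).rotate p.length = (List.replicate k p).flatten := by
  obtain ⟨k', rfl⟩ : ∃ k', k = k' + 1 := ⟨k - 1, by omega⟩
  have h1 : (List.replicate (k' + 1) p).flatten = p ++ (List.replicate k' p).flatten := by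
    simp [List.replicate_succ]
  have h2 : (List.replicate (k' + 1) p).flatten = (List.replicate k' p).flatten ++ p := by
    rw [List.replicate_succ']; simp
  rw [List.rotate_eq_drop_append_take (by rw [h1, List.length_append]; omega)]
  rw [h1, List.drop_left, List.take_left, ← h2, h1]

-- rotation fixpoint at 1 ≤ i < |l| gives an occurrence of l inside (l++l) with ends trimmed
theorem pv_rotate_infix {α : Type} (l : List α) (i : ℕ) (h1 : 1 ≤ i) (h2 : i < l.length)
    (hrot : l.rotate i = l) : l <:+: ((l ++ l).tail.dropLast) := by
  have hi : i ≤ l.length := h2.le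
  have hdt : l.drop i ++ l.take i = l := by
    rw [← List.rotate_eq_drop_append_take hi, hrot]
  have hdecomp : l ++ l = l.take i ++ (l ++ l.drop i) := by
    have hta := List.take_append_drop i l
    set a := l.take i with ha
    set b := l.drop i with hb
    conv_lhs => rw [← hta]
    conv_rhs => rw [← hdt]
    simp [List.append_assoc]
  have htake_ne : l.take i ≠ [] := by
    have hlen : (l.take i).length = i := by simp; omega
    intro h; rw [h] at hlen; simp at hlen; omega
  have hdrop_ne : l.drop i ≠ [] := by
    have hlen : (l.drop i).length = l.length - i := by simp
    intro h; rw [h] at hlen; simp at hlen; omega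
  have e1 : (l ++ l).tail = (l.take i).tail ++ (l ++ l.drop i) := by
    rw [hdecomp, List.tail_append]
    simp [List.isEmpty_iff, htake_ne]
  have e2 : (l ++ l).tail.dropLast = (l.take i).tail ++ (l ++ (l.drop i).dropLast) := by
    rw [e1, List.dropLast_append, List.dropLast_append]
    simp [List.isEmpty_iff, hdrop_ne]
  exact ⟨(l.take i).tail, (l.drop i).dropLast, by rw [e2]; simp [List.append_assoc]⟩

-- occurrence inside the trimmed doubling gives a rotation fixpoint with 1 ≤ i < |l|
theorem pv_infix_rotate {α : Type} (l : List α) (hl : l ≠ [])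
    (h : l <:+: ((l ++ l).tail.dropLast)) : ∃ i, 1 ≤ i ∧ i < l.length ∧ l.rotate i = l := by
  obtain ⟨x, y, hxy⟩ := h
  have hn : 1 ≤ l.length := List.length_pos_iff.mpr hl
  obtain ⟨c, t, hct⟩ : ∃ c t, l ++ l = c :: t := by
    cases h : l ++ l with
    | nil => simp at h; exact absurd h hl
    | cons c t => exact ⟨c, t, rfl⟩
  have ht_ne : t ≠ [] := by
    have hlen := congrArg List.length hct
    simp at hlen
    intro h; rw [h] at hlen; simp at hlen; omega
  have htail : (l ++ l).tail = t := by rw [hct]; rfl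
  have hdl : t.dropLast = x ++ l ++ y := by rw [← htail, hxy]
  have ht' : t = x ++ l ++ (y ++ [t.getLast ht_ne]) := by
    conv_lhs => rw [← List.dropLast_append_getLast ht_ne]
    rw [hdl]
    simp [List.append_assoc]
  have hfull : l ++ l = (c :: x) ++ l ++ (y ++ [t.getLast ht_ne]) := by
    rw [hct]
    conv_lhs => rw [ht']
    simp [List.append_assoc]
  set i := (c :: x).length with hi
  have hlen2 : 2 * l.length = i + l.length + (y.length + 1) := by
    have hlen := congrArg List.length hfull
    simp at hlen
    simp [hi]
    omega
  have hi1 : 1 ≤ i := by simp [hi]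
  have hilt : i < l.length := by omega
  refine ⟨i, hi1, hilt, ?_⟩
  have hdrop1 : (l ++ l).drop i = l ++ (y ++ [t.getLast ht_ne]) := by
    rw [hfull, List.append_assoc, List.drop_left]
  have hdrop2 : (l ++ l).drop i = l.drop i ++ l := by
    rw [List.drop_append_of_le_length hilt.le]
  have htaken : (l.drop i ++ l).take l.length = l.drop i ++ l.take i := by
    rw [List.take_append]
    have hdl2 : (l.drop i).length = l.length - i := by simp
    rw [List.take_of_length_le (by rw [hdl2]; omega)]
    congr 1
    rw [hdl2]
    congr 1
    omega
  have hkey : l.drop i ++ l.take i = l := by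
    rw [← htaken, ← hdrop2, hdrop1, List.take_left]
  rw [List.rotate_eq_drop_append_take hilt.le, hkey]

-- iterate a rotation fixpoint
theorem pv_rotate_mul {α : Type} (l : List α) (i : ℕ) (h : l.rotate i = l) :
    ∀ m, l.rotate (m * i) = l := by
  intro m
  induction m with
  | zero => simp
  | succ m ih =>
    have : (m + 1) * i = m * i + i := by ring
    rw [this, ← List.rotate_rotate, ih, h]

-- some multiple of i hits gcd i n modulo n
theorem pv_gcd_reachable (i n : ℕ) (hi : 0 < i) (hin : i < n) :
    ∃ m : ℕ, (m * i) % n = Nat.gcd i n := by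
  have hn : 0 < n := lt_of_le_of_lt (Nat.zero_le i) hin
  have hg_lt : Nat.gcd i n < n := lt_of_le_of_lt (Nat.gcd_le_left n hi) hin
  have hbezout := Nat.gcd_eq_gcd_ab i n
  set u := Nat.gcdA i n with hu
  set v := Nat.gcdB i n with hv
  refine ⟨(u % (n : ℤ)).toNat, ?_⟩
  have hnz : (n : ℤ) ≠ 0 := by exact_mod_cast hn.ne'
  have hmod_nonneg : 0 ≤ u % (n : ℤ) := Int.emod_nonneg u hnz
  have hcast : ((u % (n : ℤ)).toNat : ℤ) = u % (n : ℤ) := Int.toNat_of_nonneg hmod_nonneg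
  have h1 : (u % (n : ℤ) * i) % n = (u * i) % n := by
    rw [Int.mul_emod, Int.emod_emod_of_dvd _ dvd_rfl, ← Int.mul_emod]
  have h2 : u * (i : ℤ) = (Nat.gcd i n : ℤ) - n * v := by linarith [hbezout]
  have h3 : ((Nat.gcd i n : ℤ) - n * v) % n = (Nat.gcd i n : ℤ) := by
    rw [Int.sub_emod, Int.mul_emod_right, sub_zero, Int.emod_emod_of_dvd _ dvd_rfl]
    exact Int.emod_eq_of_lt (by positivity) (by exact_mod_cast hg_lt)
  have key : (((u % (n : ℤ)).toNat * i : ℕ) : ℤ) % n = (Nat.gcd i n : ℤ) := by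
    push_cast [hcast]
    rw [h1, h2, h3]
  exact_mod_cast key

-- commuting lists: if a ++ b = b ++ a and |b| = k * |a| then b = a^k
theorem pv_commute_power {α : Type} (a : List α) :
    ∀ (k : ℕ) (b : List α), b.length = k * a.length → a ++ b = b ++ a →
      b = (List.replicate k a).flatten := by
  intro k
  induction k with
  | zero => intro b hb _; simp at hb ⊢; exact hb
  | succ k ih =>
    intro b hb hcomm
    by_cases ha : a = []
    · subst ha; simp at hb ⊢; exact hb
    have hal : 0 < a.length := List.length_pos_iff.mpr ha
    have hba : a.length ≤ b.length := by rw [hb]; nlinarith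
    have htake : b.take a.length = a := by
      have h1 : (a ++ b).take a.length = a := List.take_left
      have h2 : (b ++ a).take a.length = b.take a.length := List.take_append_of_le_length hba
      rw [hcomm] at h1; rw [h2] at h1; exact h1
    set b' := b.drop a.length with hb'
    have hbsplit : b = a ++ b' := by rw [← htake, hb', List.take_append_drop]
    have hb'len : b'.length = k * a.length := by
      simp [hb', hb]; ring_nf; omega
    have hcomm' : a ++ b' = b' ++ a := by
      have : a ++ (a ++ b') = a ++ (b' ++ a) := by
        conv_lhs => rw [← hbsplit]
        rw [hcomm, hbsplit, List.append_assoc]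
      exact List.append_cancel_left this
    have := ih b' hb'len hcomm'
    rw [hbsplit, this, List.replicate_succ, List.flatten_cons]

-- a rotation fixpoint at a divisor g of |l| makes l the (|l|/g)-fold power of its g-prefix
theorem pv_rotate_power {α : Type} (l : List α) (g : ℕ) (hg : 0 < g) (hgl : g < l.length)
    (hdvd : g ∣ l.length) (hrot : l.rotate g = l) :
    (List.replicate (l.length / g) (l.take g)).flatten = l := by
  have hgle : g ≤ l.length := hgl.le
  have hdt : l.drop g ++ l.take g = l := by rw [← List.rotate_eq_drop_append_take hgle, hrot]
  have hcomm : l.take g ++ l.drop g = l.drop g ++ l.take g := by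
    rw [List.take_append_drop, hdt]
  have hlen : (l.drop g).length = (l.length / g - 1) * (l.take g).length := by
    obtain ⟨c, hc⟩ := hdvd
    simp [List.length_drop, List.length_take, Nat.min_eq_left hgle]
    rw [hc, Nat.mul_div_cancel_left c hg, Nat.sub_mul, one_mul, Nat.mul_comm]
  have := pv_commute_power (l.take g) (l.length / g - 1) (l.drop g) hlen hcomm
  have hk : l.length / g = (l.length / g - 1) + 1 := by
    have : 1 ≤ l.length / g := Nat.one_le_div_iff hg |>.mpr hgle
    omega
  rw [hk, List.replicate_succ, List.flatten_cons, ← this, List.take_append_drop]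


-- the list-level heart: "some block of length ≤ n/2 dividing n repeats to l"  ⟺  "l occurs in (l++l) trimmed"
theorem pv_key (l : List Char) (hl : l ≠ []) :
    (∃ d : ℕ, 1 ≤ d ∧ d ≤ l.length / 2 ∧ l.length % d = 0 ∧
        (List.replicate (l.length / d) (l.take d)).flatten = l)
    ↔ l <:+: ((l ++ l).tail.dropLast) := by
  have hn : 1 ≤ l.length := List.length_pos_iff.mpr hl
  constructor
  · rintro ⟨d, hd1, hd2, _, hpow⟩
    have hdn : d < l.length := by omega
    have hk : 1 ≤ l.length / d := (Nat.one_le_div_iff (by omega)).mpr hdn.le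
    have hlen_take : (l.take d).length = d := by simp; omega
    have hrot : l.rotate d = l := by
      have hpr := pv_power_rotate (l.take d) (l.length / d) hk
      rw [hpow, hlen_take] at hpr
      exact hpr
    exact pv_rotate_infix l d hd1 hdn hrot
  · intro h
    obtain ⟨i, hi1, hilt, hrot⟩ := pv_infix_rotate l hl h
    set g := Nat.gcd i l.length with hg
    have hgpos : 0 < g := Nat.gcd_pos_of_pos_left _ hi1
    have hgdvd : g ∣ l.length := Nat.gcd_dvd_right i l.length
    have hgle : g ≤ i := Nat.gcd_le_left _ hi1
    have hglt : g < l.length := lt_of_le_of_lt hgle hilt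
    obtain ⟨m, hm⟩ := pv_gcd_reachable i l.length hi1 hilt
    have hrotg : l.rotate g = l := by
      have h1 := pv_rotate_mul l i hrot m
      have h2 : l.rotate ((m * i) % l.length) = l := by rw [List.rotate_mod, h1]
      rw [hm] at h2
      exact h2
    have hpow := pv_rotate_power l g hgpos hglt hgdvd hrotg
    obtain ⟨c, hc⟩ := hgdvd
    have hc2 : 2 ≤ c := by
      rcases Nat.lt_or_ge c 2 with hcl | hcl
      · interval_cases c <;> omega
      · exact hcl
    have hmul : g * 2 ≤ l.length := by
      calc g * 2 ≤ g * c := Nat.mul_le_mul_left g hc2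
      _ = l.length := hc.symm
    refine ⟨g, hgpos, ?_, ?_, hpow⟩
    · exact (Nat.le_div_iff_mul_le (by omega)).mpr hmul
    · simp [hc, Nat.mul_mod_right]

-- python s[1:-1]
theorem pv_slice_one_negOne (xs : List Char) (h : 1 ≤ xs.length) :
    PySem.List.slice xs (some 1) (some (-1)) = xs.tail.dropLast := by
  have ha : PySem.List.clampIdx xs.length 1 = 1 := by
    unfold PySem.List.clampIdx
    rw [if_neg (by omega)]
    simp
    omega
  have hb : PySem.List.clampIdx xs.length (-1) = xs.length - 1 := by
    unfold PySem.List.clampIdx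
    rw [if_pos (by omega), if_neg (by omega)]
    omega
  simp only [PySem.List.slice, ha, hb]
  rw [List.drop_one, List.dropLast_eq_take]
  congr 1
  simp

-- A's loop, characterised
theorem pv_A_iff (num : Int) :
    is_invalid_id_part2 num = true ↔
      ∃ d : ℕ, 1 ≤ d ∧ d ≤ (PySem.Int.toChars num).length / 2 ∧
        (PySem.Int.toChars num).length % d = 0 ∧
        (List.replicate ((PySem.Int.toChars num).length / d)
          ((PySem.Int.toChars num).take d)).flatten = PySem.Int.toChars num := by
  unfold is_invalid_id_part2
  set l := PySem.Int.toChars num with hldef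
  rw [List.any_eq_true]
  constructor
  · rintro ⟨x, hmem, hx⟩
    rw [PySem.List.mem_pyRange_one] at hmem
    obtain ⟨hx1, hx2⟩ := hmem
    rw [PySem.List.len_eq] at hx2
    have hx2' : x ≤ PySem.Int.floordiv (l.length : Int) 2 := by omega
    rw [(by exact_mod_cast PySem.Int.floordiv_natCast l.length 2 : PySem.Int.floordiv (l.length : Int) 2 = ((l.length / 2 : ℕ) : Int))] at hx2'
    obtain ⟨d, rfl⟩ : ∃ d : ℕ, x = (d : Int) := ⟨x.toNat, (Int.toNat_of_nonneg (by omega)).symm⟩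
    have hd1 : 1 ≤ d := by exact_mod_cast hx1
    have hd2 : d ≤ l.length / 2 := by exact_mod_cast hx2'
    rw [PySem.List.len_eq] at hx
    split at hx
    case isTrue hmod =>
      rw [beq_iff_eq] at hx
      refine ⟨d, hd1, hd2, ?_, ?_⟩
      · have : ((d : Int)) ∣ (l.length : Int) := (PySem.Int.mod_eq_zero_iff_dvd _ _).mp (by simpa using hmod)
        have : d ∣ l.length := by exact_mod_cast this
        omega
      · rw [PySem.List.slice_to l (by positivity)] at hx
        rw [(by exact_mod_cast PySem.Int.floordiv_natCast l.length d : PySem.Int.floordiv (l.length : Int) (d : Int) = ((l.length / d : ℕ) : Int))] at hx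
        show (List.replicate (((l.length / d : ℕ) : Int)).toNat (l.take ((d : Int)).toNat)).flatten = l
        exact hx
    case isFalse => simp at hx
  · rintro ⟨d, hd1, hd2, hmod, hpow⟩
    refine ⟨(d : Int), ?_, ?_⟩
    · rw [PySem.List.mem_pyRange_one, PySem.List.len_eq]
      rw [(by exact_mod_cast PySem.Int.floordiv_natCast l.length 2 : PySem.Int.floordiv (l.length : Int) 2 = ((l.length / 2 : ℕ) : Int))]
      constructor
      · exact_mod_cast hd1
      · have : (d : Int) ≤ ((l.length / 2 : ℕ) : Int) := by exact_mod_cast hd2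
        omega
    · rw [PySem.List.len_eq]
      have hdvd : ((d : Int)) ∣ (l.length : Int) := by
        have : d ∣ l.length := Nat.dvd_of_mod_eq_zero hmod
        exact_mod_cast this
      rw [if_pos (by simpa using (PySem.Int.mod_eq_zero_iff_dvd (l.length : Int) (d : Int)).mpr hdvd)]
      rw [beq_iff_eq]
      rw [PySem.List.slice_to l (by positivity)]
      rw [(by exact_mod_cast PySem.Int.floordiv_natCast l.length d : PySem.Int.floordiv (l.length : Int) (d : Int) = ((l.length / d : ℕ) : Int))]
      show (List.replicate (((l.length / d : ℕ) : Int)).toNat (l.take ((d : Int)).toNat)).flatten = l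
      simpa using hpow

-- B's membership test, characterised
theorem pv_B_iff (num : Int) :
    is_invalid_id_part2_alt num = true ↔
      (PySem.Int.toChars num) <:+:
        (((PySem.Int.toChars num) ++ (PySem.Int.toChars num)).tail.dropLast) := by
  show PySem.Chars.isIn (PySem.Int.toChars num)
      (PySem.List.slice ((PySem.Int.toChars num) ++ (PySem.Int.toChars num)) (some 1) (some (-1))) = true ↔ _
  set l := PySem.Int.toChars num with hldef
  have hn : 1 ≤ (l ++ l).length := by
    have := List.length_pos_iff.mpr (pv_toChars_ne_nil num)
    rw [← hldef] at this
    simp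
    omega
  rw [pv_slice_one_negOne _ hn, PySem.Chars.isIn_iff_infix]

-- ===== VERDICT (by name: the statement is the Claim_ definition above) =====
theorem is_invalid_id_part2_spec : Claim_equal_is_invalid_id_part2 := by
  intro num _
  unfold Spec_is_invalid_id_part2
  have hiff : is_invalid_id_part2 num = true ↔ is_invalid_id_part2_alt num = true := by
    rw [pv_A_iff num, pv_B_iff num]
    exact pv_key (PySem.Int.toChars num) (pv_toChars_ne_nil num)
  cases h1 : is_invalid_id_part2 num <;> cases h2 : is_invalid_id_part2_alt num <;> simp_all
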